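-- pv_equiv track=rewrite | github.com/Leev1tan/langchain | evaluate.py | group_benchmark_by_database
-- ===== SOURCE A (Python) =====
-- def group_benchmark_by_database(benchmark_data):
--     """Group benchmark questions by database"""
--     grouped = {}
--     for item in benchmark_data:
--         db_id = item.get('db_id', '').lower()
--         if db_id not in grouped:
--             grouped[db_id] = []
--         grouped[db_id].append(item)
--     return grouped
-- ===== SOURCE B (Python) =====
-- def group_benchmark_by_database(benchmark_data):
--     """Group benchmark questions by database (key scan + per-key filter)"""
--     keys = dict.fromkeys(item.get('db_id', '').lower() for item in benchmark_data)
--     return {k: [item for item in benchmark_data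
--                 if item.get('db_id', '').lower() == k]
--             for k in keys}
-- ===== Notes on version B (the rewrite author's own statement) =====
-- stated objective: alternative
-- what changed: Replaces the single-pass dict-bucket accumulation by a two-phase scheme: collect the distinct lowercased db_ids in first-appearance order with dict.fromkeys, then build each group by filtering the whole input per key.
import Mathlib
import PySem

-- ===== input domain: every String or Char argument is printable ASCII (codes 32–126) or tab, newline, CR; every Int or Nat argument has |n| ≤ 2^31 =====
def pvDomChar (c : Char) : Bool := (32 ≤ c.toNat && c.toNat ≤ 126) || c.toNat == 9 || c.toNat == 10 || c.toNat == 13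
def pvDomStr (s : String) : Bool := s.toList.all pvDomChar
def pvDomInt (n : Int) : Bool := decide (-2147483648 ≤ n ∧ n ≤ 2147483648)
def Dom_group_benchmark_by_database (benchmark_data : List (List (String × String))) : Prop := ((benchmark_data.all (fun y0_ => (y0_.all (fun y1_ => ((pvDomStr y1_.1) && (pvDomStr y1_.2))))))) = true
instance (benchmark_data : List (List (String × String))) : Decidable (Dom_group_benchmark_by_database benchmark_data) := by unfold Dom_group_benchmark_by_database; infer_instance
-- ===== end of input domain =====

-- B replaces A's single-pass dict-bucket accumulation by a two-phase scheme (distinct keys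
-- first, then one filter pass per key); alternative decomposition, not claimed faster.

-- item.get('db_id', '').lower()  — shared key extraction, used verbatim by both ports
def pvKey (item : List (String × String)) : String :=
  PySem.Str.lower ((PySem.Dict.mk item).getD "db_id" "")

-- ===== PORT A =====
def group_benchmark_by_database (benchmark_data : List (List (String × String))) : List (String × List (List (String × String))) :=
  (benchmark_data.foldl
    (fun grouped item =>
      let db_id := pvKey item
      let grouped := if grouped.contains db_id then grouped
                     else grouped.insert db_id ([] : List (List (String × String)))
      grouped.modify db_id [] (fun l => l ++ [item]))
    PySem.Dict.empty).items

-- ===== PORT B =====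
def group_benchmark_by_database_alt (benchmark_data : List (List (String × String))) : List (String × List (List (String × String))) :=
  (PySem.List.dedup (benchmark_data.map pvKey)).map
    (fun k => (k, benchmark_data.filter (fun item => pvKey item == k)))

-- ===== PRECONDITION & SPEC =====
def Spec_group_benchmark_by_database (benchmark_data : List (List (String × String))) (out : List (String × List (List (String × String)))) : Prop := out = group_benchmark_by_database_alt benchmark_data
instance (benchmark_data : List (List (String × String))) (out : List (String × List (List (String × String)))) : Decidable (Spec_group_benchmark_by_database benchmark_data out) := by unfold Spec_group_benchmark_by_database; infer_instance

-- ===== CLAIM (what is proved, stated in full; the proofs are below) =====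
def Claim_equal_group_benchmark_by_database : Prop := ∀ (benchmark_data : List (List (String × String))), Dom_group_benchmark_by_database benchmark_data → Spec_group_benchmark_by_database benchmark_data (group_benchmark_by_database benchmark_data)

-- ===== LEMMAS AND PROOFS =====

-- A's loop body (insert-if-absent, then append) is one Python-dict modify.
theorem pvStep_eq (g : PySem.Dict String (List (List (String × String)))) (item : List (String × String)) :
    (let db_id := pvKey item
     let grouped := if g.contains db_id then g
                    else g.insert db_id ([] : List (List (String × String)))
     grouped.modify db_id [] (fun l => l ++ [item]))
    = g.modify (pvKey item) [] (fun l => l ++ [item]) := by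
  show (if g.contains (pvKey item) then g else g.insert (pvKey item) []).modify (pvKey item) [] _ = _
  by_cases h : g.contains (pvKey item) = true
  · rw [if_pos h]
  · rw [if_neg h]
    set k := pvKey item with hkdef
    have h' : g.contains k = false := eq_false_of_ne_true h
    have hk : ∀ p ∈ g.items, p.1 ≠ k := by
      intro p hp hpk
      have hm : k ∈ g.keys := by
        simp only [PySem.Dict.keys]
        exact List.mem_map.2 ⟨p, hp, hpk⟩
      rw [← PySem.Dict.contains_iff_mem_keys] at hm
      simp [h'] at hm
    have he : ({ items := g.items ++ [(k, ([] : List (List (String × String))))] } : PySem.Dict String (List (List (String × String)))) = g.insert k [] := by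
      apply PySem.Dict.ext
      simp [PySem.Dict.items_insert, h']
    have h4 : ({ items := g.items ++ [(k, ([] : List (List (String × String))))] } : PySem.Dict String (List (List (String × String)))).getD k [] = [] := by
      rw [he]; exact PySem.Dict.getD_insert_self _ _ _ _
    have h3 : g.getD k [] = [] := PySem.Dict.getD_of_not_contains _ _ h'
    simp [PySem.Dict.modify, PySem.Dict.insert, h', h4, h3]
    exact (List.map_congr_left (fun p hp => by simp [hk p hp])).trans (List.map_id _)

-- The whole loop, rewritten with that body.
theorem pvFold_eq (benchmark_data : List (List (String × String))) :
    (benchmark_data.foldl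
      (fun grouped item =>
        let db_id := pvKey item
        let grouped := if grouped.contains db_id then grouped
                       else grouped.insert db_id ([] : List (List (String × String)))
        grouped.modify db_id [] (fun l => l ++ [item]))
      PySem.Dict.empty)
    = benchmark_data.foldl (fun d item => d.modify (pvKey item) [] (fun l => l ++ [item])) PySem.Dict.empty := by
  congr 1
  funext g item
  exact pvStep_eq g item

-- Each bucket of the loop's dict is the filter of the input at that key.
theorem pvFold_getD (benchmark_data : List (List (String × String))) (c : String) :
    (benchmark_data.foldl (fun d item => d.modify (pvKey item) [] (fun l => l ++ [item])) PySem.Dict.empty).getD c []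
    = benchmark_data.filter (fun item => pvKey item == c) := by
  have hm : (benchmark_data.foldl (fun d item => d.modify (pvKey item) [] (fun l => l ++ [item])) PySem.Dict.empty)
      = (benchmark_data.map (fun it => (pvKey it, it))).foldl (fun d p => d.modify p.1 [] (fun l => l ++ [p.2])) PySem.Dict.empty := by
    rw [List.foldl_map]
  rw [hm, PySem.Dict.getD_foldl_modify_append]
  simp [List.filter_map, Function.comp_def]

-- ===== VERDICT (by name: the statement is the Claim_ definition above) =====
theorem group_benchmark_by_database_spec : Claim_equal_group_benchmark_by_database := by
  intro bd _
  unfold Spec_group_benchmark_by_database group_benchmark_by_database group_benchmark_by_database_alt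
  rw [pvFold_eq]
  set F := bd.foldl (fun d item => d.modify (pvKey item) [] (fun l => l ++ [item])) PySem.Dict.empty with hF
  have hnd : F.keys.Nodup :=
    PySem.Dict.nodup_keys_foldl_modify_key bd pvKey [] (fun _ item => fun l => l ++ [item]) PySem.Dict.empty PySem.Dict.nodup_keys_empty
  have hkeys : F.keys = PySem.List.dedup (bd.map pvKey) := by
    rw [hF, PySem.Dict.keys_foldl_modify_key, PySem.Dict.keys_empty, PySem.Set.update_nil_left,
      PySem.List.dedup_eq_ofList]
  rw [PySem.Dict.items_eq_map_keys F hnd [], hkeys]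
  exact (List.map_congr_left (fun k _ => by rw [hF, pvFold_getD])).symm
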